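-- pv_equiv track=rewrite | github.com/hongwonJ/leetcode | 120-triangle/120-triangle.py | buildAdj
-- ===== SOURCE A (Python) =====
-- from typing import List
--
-- def buildAdj(triangle: List[List[int]]) -> int:
--     h, Adj = len(triangle), dict()
--     for i in range(h):
--         w = len(triangle[i])
--         for j in range(w):
--             TIS = 0
--             for k in range(i+1): TIS += k
--             TIS += j
--             if i + 1 < h: Adj[TIS] = [TIS + i + 1, TIS + i + 2]
--     return Adj
-- ===== SOURCE B (Python) =====
-- from typing import List
--
-- def buildAdj(triangle: List[List[int]]) -> int:
--     Adj = {}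
--     base = 0
--     for i, row in enumerate(triangle[:-1]):
--         for j in range(len(row)):
--             t = base + j
--             Adj[t] = [t + i + 1, t + i + 2]
--         base += i + 1
--     return Adj
-- ===== Notes on version B (the rewrite author's own statement) =====
-- stated objective: faster
-- what changed: Instead of recomputing the row's flat base index with an inner summation loop over range(i+1), B iterates enumerate(triangle[:-1]) keeping a single running accumulator 'base' that is advanced by i+1 after each row, eliminating both the inner summation and the per-iteration guard.
import Mathlib
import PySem

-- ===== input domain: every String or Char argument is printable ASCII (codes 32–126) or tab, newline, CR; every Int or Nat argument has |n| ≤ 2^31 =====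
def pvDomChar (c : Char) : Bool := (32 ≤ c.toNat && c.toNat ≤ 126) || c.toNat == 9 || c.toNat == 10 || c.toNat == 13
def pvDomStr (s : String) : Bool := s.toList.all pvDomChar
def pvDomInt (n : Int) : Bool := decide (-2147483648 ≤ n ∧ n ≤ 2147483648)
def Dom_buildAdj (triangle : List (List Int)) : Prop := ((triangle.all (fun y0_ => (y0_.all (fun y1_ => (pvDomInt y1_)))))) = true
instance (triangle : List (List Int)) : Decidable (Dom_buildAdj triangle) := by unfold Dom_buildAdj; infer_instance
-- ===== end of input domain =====

-- B drops the guarded last row via triangle[:-1] and replaces A's inner summation loop by a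
-- single running accumulator advanced by i+1 per row (faster in a timing run).

-- ===== PORT A =====
def buildAdj (triangle : List (List Int)) : List (Int × List Int) :=
  let h := triangle.length
  ((PySem.List.pyRange 0 (h : Int) 1).foldl (fun Adj i =>
    let w := (PySem.List.pyGetD triangle i []).length
    (PySem.List.pyRange 0 (w : Int) 1).foldl (fun Adj j =>
      let TIS := (PySem.List.pyRange 0 (i + 1) 1).foldl (fun t k => t + k) 0 + j
      if i + 1 < (h : Int) then PySem.Dict.insert Adj TIS [TIS + i + 1, TIS + i + 2] else Adj)
      Adj)
    (PySem.Dict.empty : PySem.Dict Int (List Int))).items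

-- ===== PORT B =====
def buildAdj_alt (triangle : List (List Int)) : List (Int × List Int) :=
  (((PySem.List.enumerate (PySem.List.slice triangle none (some (-1))) 0).foldl
    (fun st p =>
      ((PySem.List.pyRange 0 ((p.2.length : Int)) 1).foldl
        (fun Adj j =>
          let t := st.2 + j
          PySem.Dict.insert Adj t [t + p.1 + 1, t + p.1 + 2]) st.1,
       st.2 + p.1 + 1))
    ((PySem.Dict.empty : PySem.Dict Int (List Int)), (0 : Int))).1).items

-- ===== PRECONDITION & SPEC =====
def Spec_buildAdj (triangle : List (List Int)) (out : List (Int × List Int)) : Prop := out = buildAdj_alt triangle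
instance (triangle : List (List Int)) (out : List (Int × List Int)) : Decidable (Spec_buildAdj triangle out) := by unfold Spec_buildAdj; infer_instance

-- ===== CLAIM (what is proved, stated in full; the proofs are below) =====
def Claim_equal_buildAdj : Prop := ∀ (triangle : List (List Int)), Dom_buildAdj triangle → Spec_buildAdj triangle (buildAdj triangle)

-- ===== LEMMAS AND PROOFS =====

-- the triangular number k*(k+1)//2, the closed form of A's inner summation loop
def pvTri (k : Nat) : Int := PySem.Int.floordiv ((k : Int) * ((k : Int) + 1)) 2

-- sum(range(i+1)) = i*(i+1)//2
theorem pv_sum_range (n : Nat) :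
    (PySem.List.pyRange 0 ((n : Int) + 1) 1).foldl (fun t k => t + k) 0 = pvTri n := by
  induction n with
  | zero => decide
  | succ m ih =>
      have h1 : ((m : Int) + 1) + 1 = ((m + 1 : Nat) : Int) + 1 := by push_cast; ring
      rw [← h1, PySem.List.pyRange_one_succ_right (by positivity), List.foldl_append, ih]
      simp only [List.foldl, pvTri]
      rw [PySem.Int.floordiv_eq_ediv_of_pos (by norm_num),
          PySem.Int.floordiv_eq_ediv_of_pos (by norm_num)]
      push_cast
      have key : ((m:Int)+1)*(((m:Int)+1)+1) = (m:Int)*((m:Int)+1) + 2*((m:Int)+1) := by ring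
      omega

theorem pvTri_succ (k : Nat) : pvTri (k + 1) = pvTri k + (k : Int) + 1 := by
  simp only [pvTri]
  rw [PySem.Int.floordiv_eq_ediv_of_pos (by norm_num),
      PySem.Int.floordiv_eq_ediv_of_pos (by norm_num)]
  push_cast
  have key : ((k:Int)+1)*(((k:Int)+1)+1) = (k:Int)*((k:Int)+1) + 2*((k:Int)+1) := by ring
  omega

-- a foldl whose body ignores the element is the identity
theorem pv_foldl_id {α β : Type} (l : List α) (a : β) : l.foldl (fun b _ => b) a = a := by
  induction l generalizing a with
  | nil => rfl
  | cons x xs ih => simp only [List.foldl_cons]; exact ih a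

-- B's pair-state fold over enumerate, with running base = pvTri k, computes the same dict as
-- the per-row fold that uses the closed-form base pvTri i directly.
theorem pv_pair_fold (rows : List (List Int)) (k : Nat) (Adj : PySem.Dict Int (List Int)) :
    ((PySem.List.enumerate rows (k : Int)).foldl
      (fun st p =>
        ((PySem.List.pyRange 0 ((p.2.length : Int)) 1).foldl
          (fun Adj j =>
            let t := st.2 + j
            PySem.Dict.insert Adj t [t + p.1 + 1, t + p.1 + 2]) st.1,
         st.2 + p.1 + 1))
      (Adj, pvTri k)).1
    = (PySem.List.enumerate rows (k : Int)).foldl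
        (fun Adj p =>
          (PySem.List.pyRange 0 ((p.2.length : Int)) 1).foldl
            (fun Adj j => PySem.Dict.insert Adj (pvTri p.1.toNat + j)
              [pvTri p.1.toNat + j + p.1 + 1, pvTri p.1.toNat + j + p.1 + 2]) Adj)
        Adj := by
  induction rows generalizing k Adj with
  | nil => rfl
  | cons r rs ih =>
      rw [PySem.List.enumerate_cons, List.foldl_cons, List.foldl_cons]
      have hk : ((k : Int) + 1) = ((k + 1 : Nat) : Int) := by push_cast; ring
      have hstep : pvTri k + (k : Int) + 1 = pvTri (k + 1) := (pvTri_succ k).symm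
      simp only [Int.toNat_natCast]
      rw [hstep, hk, ih]

-- ===== VERDICT (by name: the statement is the Claim_ definition above) =====
theorem buildAdj_spec : Claim_equal_buildAdj := by
  intro triangle _
  unfold Spec_buildAdj buildAdj buildAdj_alt
  simp only []
  rw [PySem.List.slice_to_neg_one]
  set h : Int := ((triangle.length : Int)) with hh
  rcases Int.lt_or_le 0 h with hpos | hnp
  · -- nonempty triangle: split off A's last (no-op) iteration
    have hsplit : PySem.List.pyRange 0 h 1 = PySem.List.pyRange 0 (h - 1) 1 ++ [h - 1] := by
      have hstep := PySem.List.pyRange_one_succ_right (a := 0) (b := h - 1) (by omega)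
      rw [show h - 1 + 1 = h from by omega] at hstep
      exact hstep
    rw [hsplit, List.foldl_append, List.foldl_cons, List.foldl_nil]
    have hne : ¬ (h - 1 + 1 < h) := by omega
    simp only [hne, if_false, pv_foldl_id]
    refine congrArg PySem.Dict.items ?_
    -- express B's enumerate fold over dropLast as a pyRange fold
    have hlen : PySem.List.len triangle.dropLast = h - 1 := by
      simp [PySem.List.len, List.length_dropLast]; omega
    have hmain := pv_pair_fold triangle.dropLast 0 (PySem.Dict.empty : PySem.Dict Int (List Int))
    simp only [Nat.cast_zero] at hmain
    rw [show pvTri 0 = (0 : Int) from by decide] at hmain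
    rw [hmain, PySem.List.enumerate_eq_map_pyRange triangle.dropLast ([] : List Int), List.foldl_map, hlen]
    apply (PySem.List.foldl_congr_mem _ _ _ _ ?_).symm
    intro acc i hi
    dsimp only []
    rw [PySem.List.mem_pyRange_one] at hi
    obtain ⟨n, hn⟩ := Int.eq_ofNat_of_zero_le hi.1
    subst hn
    have hget : PySem.List.pyGetD triangle.dropLast ((n : Int)) ([] : List Int)
        = PySem.List.pyGetD triangle ((n : Int)) ([] : List Int) := by
      have hdl : ((triangle.dropLast.length : Nat) : Int) = h - 1 := by
        simp [List.length_dropLast]; omega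
      have hn1 : n < triangle.dropLast.length := by
        have := hi.2; omega
      have hn2 : n < triangle.length := by
        have := hi.2; omega
      rw [PySem.List.pyGetD_natCast, PySem.List.pyGetD_natCast]
      rw [List.getD_eq_getElem?_getD, List.getD_eq_getElem?_getD,
          List.getElem?_eq_getElem hn1, List.getElem?_eq_getElem hn2]
      simp [List.getElem_dropLast]
    rw [hget]
    apply PySem.List.foldl_congr_mem
    intro acc2 j _
    rw [if_pos (by omega : (n : Int) + 1 < h), pv_sum_range n]
    simp
  · -- empty triangle
    have h0 : PySem.List.pyRange 0 h 1 = [] := PySem.List.pyRange_one_eq_nil (by omega)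
    have h1 : triangle.dropLast = [] := by
      have : triangle = [] := by
        cases triangle with
        | nil => rfl
        | cons a l => simp [hh] at hnp; omega
      simp [this]
    rw [h0, h1]
    rfl
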